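-- pv_equiv track=rewrite | github.com/MatthewXiarhos/The-DRUM-PROTOCOLS | sphere_pipeline.py | build_full_survey_context
-- ===== SOURCE A (Python) =====
-- def build_full_survey_context(full_rows, protocols_out):
--     """
--     Summarise full survey (1-minute) responses per protocol into a compact
--     text block for the Sphere prompt.
--     """
--     from collections import Counter
--
--     full_by_protocol = {}
--     for r in full_rows:
--         full_by_protocol.setdefault(r["protocol_code"], []).append(r)
--
--     lines = []
--     for code in sorted(protocols_out.keys()):
--         rows = full_by_protocol.get(code, [])
--         if not rows:
--             continue
--         n = len(rows)
--
--         def top(field, top_n=3):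
--             vals = [r.get(field) for r in rows if r.get(field)]
--             if not vals:
--                 return "n/a"
--             counts = Counter(vals)
--             return " / ".join(f"{v}({c})" for v, c in counts.most_common(top_n))
--
--         listener_counts = Counter(r.get("listener_type") for r in rows if r.get("listener_type"))
--         listener_str    = " | ".join(f"{k}:{v}" for k, v in listener_counts.most_common()) or "n/a"
--
--         lines.append(
--             f"{code} | n={n} | "
--             f"listener_type: {listener_str} | "
--             f"change_rating: {top('change_rating')} | "
--             f"settle_time: {top('settle_time', 2)} | "
--             f"activity: {top('activity', 2)} | "
--             f"music_opinion: {top('music_opinion', 2)} | "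
--             f"rhythm_opinion: {top('rhythm_opinion', 2)}"
--         )
--
--     return "\n".join(lines) if lines else "No 1-minute survey responses available yet."
-- ===== SOURCE B (Python) =====
-- def _bump(counter, v):
--     if v:
--         counter[v] = counter.get(v, 0) + 1
--
--
-- def _fmt(counter, top_n, pair, sep):
--     items = sorted(counter.items(), key=lambda kv: kv[1], reverse=True)
--     if top_n is not None:
--         items = items[:top_n]
--     return sep.join(pair.format(k, c) for k, c in items) or "n/a"
--
--
-- def build_full_survey_context(full_rows, protocols_out):
--     """
--     Summarise full survey (1-minute) responses per protocol into a compact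
--     text block for the Sphere prompt.
--
--     One accumulation pass over full_rows (a row count plus one counter per
--     tracked field for each protocol), then a pure formatting pass.
--     """
--     stats = {}
--     for r in full_rows:
--         st = stats.get(r["protocol_code"])
--         if st is None:
--             st = stats[r["protocol_code"]] = [0, {}, {}, {}, {}, {}, {}]
--         st[0] += 1
--         _bump(st[1], r.get("listener_type"))
--         _bump(st[2], r.get("change_rating"))
--         _bump(st[3], r.get("settle_time"))
--         _bump(st[4], r.get("activity"))
--         _bump(st[5], r.get("music_opinion"))
--         _bump(st[6], r.get("rhythm_opinion"))
--
--     lines = []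
--     for code in sorted(protocols_out.keys()):
--         st = stats.get(code)
--         if st is None:
--             continue
--         lines.append(
--             f"{code} | n={st[0]} | "
--             f"listener_type: {_fmt(st[1], None, '{}:{}', ' | ')} | "
--             f"change_rating: {_fmt(st[2], 3, '{}({})', ' / ')} | "
--             f"settle_time: {_fmt(st[3], 2, '{}({})', ' / ')} | "
--             f"activity: {_fmt(st[4], 2, '{}({})', ' / ')} | "
--             f"music_opinion: {_fmt(st[5], 2, '{}({})', ' / ')} | "
--             f"rhythm_opinion: {_fmt(st[6], 2, '{}({})', ' / ')}"
--         )
--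
--     return "\n".join(lines) if lines else "No 1-minute survey responses available yet."
-- ===== Notes on version B (the rewrite author's own statement) =====
-- stated objective: alternative
-- what changed: B replaces A's group-rows-into-lists-then-rescan-each-protocol-seven-times structure by a single accumulation pass that keeps, per protocol, only a row count and one counter per tracked field, followed by a pure formatting pass over the prebuilt counters; rows are never stored or rescanned.
import Mathlib
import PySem

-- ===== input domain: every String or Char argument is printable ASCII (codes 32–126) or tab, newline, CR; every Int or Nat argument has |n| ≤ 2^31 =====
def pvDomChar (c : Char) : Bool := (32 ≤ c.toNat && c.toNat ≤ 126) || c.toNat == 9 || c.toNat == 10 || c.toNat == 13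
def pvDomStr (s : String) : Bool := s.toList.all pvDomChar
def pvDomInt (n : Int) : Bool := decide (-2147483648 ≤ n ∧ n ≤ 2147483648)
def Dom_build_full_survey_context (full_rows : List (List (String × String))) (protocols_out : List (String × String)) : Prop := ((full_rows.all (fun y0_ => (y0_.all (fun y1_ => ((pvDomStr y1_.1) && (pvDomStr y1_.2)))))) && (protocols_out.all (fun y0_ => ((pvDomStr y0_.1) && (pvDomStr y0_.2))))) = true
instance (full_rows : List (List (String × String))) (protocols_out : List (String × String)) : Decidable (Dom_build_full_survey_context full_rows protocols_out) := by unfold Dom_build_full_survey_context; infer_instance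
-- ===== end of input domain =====

-- B replaces A's group-rows-then-rescan-7-times structure by a single accumulation pass
-- (a row count plus one prebuilt counter per tracked field for each protocol) followed by a
-- pure formatting pass; same output, similar cost (objective: alternative decomposition).

-- r.get(k) / r[k] on a row dict represented as an association list: first match (the convention's dict lookup)
def pvGet (r : List (String × String)) (k : String) : Option String := (PySem.Dict.mk r).get? k

-- Python truthiness of `r.get(field)`: a present, non-empty string
def pvTruthy (v : Option String) : Bool := v.getD "" != ""

-- ===== PORT A =====

-- `[r.get(field) for r in rows if r.get(field)]`
def pvVals (rows : List (List (String × String))) (field : String) : List String :=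
  ((rows.map (fun r => pvGet r field)).filter pvTruthy).map (fun v => v.getD "")

-- A's inner `top(field, top_n)`: Counter(vals).most_common(top_n) is the stable
-- count-descending sort of the counter's items (first-insertion order on ties), truncated.
def pvTopA (rows : List (List (String × String))) (field : String) (top_n : Nat) : String :=
  let vals := pvVals rows field
  if vals = [] then "n/a"
  else
    PySem.Str.join " / "
      (((PySem.List.sorted (PySem.Dict.counter vals).items (fun kv => kv.2) true).take top_n).map
        (fun kv => kv.1 ++ "(" ++ PySem.Int.toStr kv.2 ++ ")"))

-- listener_counts / listener_str (" | ".join(...) or "n/a")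
def pvListenerA (rows : List (List (String × String))) : String :=
  let s := PySem.Str.join " | "
    ((PySem.List.sorted (PySem.Dict.counter (pvVals rows "listener_type")).items (fun kv => kv.2) true).map
      (fun kv => kv.1 ++ ":" ++ PySem.Int.toStr kv.2))
  if s = "" then "n/a" else s

def pvLineA (code : String) (rows : List (List (String × String))) : String :=
  code ++ " | n=" ++ PySem.Int.toStr (rows.length : Int) ++ " | " ++
  "listener_type: " ++ pvListenerA rows ++ " | " ++
  "change_rating: " ++ pvTopA rows "change_rating" 3 ++ " | " ++
  "settle_time: " ++ pvTopA rows "settle_time" 2 ++ " | " ++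
  "activity: " ++ pvTopA rows "activity" 2 ++ " | " ++
  "music_opinion: " ++ pvTopA rows "music_opinion" 2 ++ " | " ++
  "rhythm_opinion: " ++ pvTopA rows "rhythm_opinion" 2

-- full_by_protocol.setdefault(r["protocol_code"], []).append(r); a row without the key raises (excluded by Pre_)
def pvStepA (d : PySem.Dict String (List (List (String × String)))) (r : List (String × String)) :
    PySem.Dict String (List (List (String × String))) :=
  match pvGet r "protocol_code" with
  | some code => d.modify code [] (fun l => l ++ [r])
  | none => d

def build_full_survey_context (full_rows : List (List (String × String))) (protocols_out : List (String × String)) : String :=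
  let full_by_protocol := full_rows.foldl pvStepA PySem.Dict.empty
  let lines := (PySem.List.sorted (PySem.Dict.ofList protocols_out).keys (fun s => s) false).foldl
    (fun lines code =>
      let rows := full_by_protocol.getD code []
      if rows = [] then lines else lines ++ [pvLineA code rows]) ([] : List String)
  if lines = [] then "No 1-minute survey responses available yet." else PySem.Str.join "\n" lines

-- ===== PORT B =====

-- stats[code] = [n, listener, change, settle, activity, music, rhythm]
structure PvStat where
  n : Int
  lt : PySem.Dict String Int
  cr : PySem.Dict String Int
  st : PySem.Dict String Int
  ac : PySem.Dict String Int
  mo : PySem.Dict String Int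
  ro : PySem.Dict String Int
deriving Repr, DecidableEq

def pvStat0 : PvStat := ⟨0, .empty, .empty, .empty, .empty, .empty, .empty⟩

-- _bump(counter, v): if v: counter[v] = counter.get(v, 0) + 1
def pvBump (c : PySem.Dict String Int) (v : Option String) : PySem.Dict String Int :=
  if pvTruthy v then c.insert (v.getD "") (c.getD (v.getD "") 0 + 1) else c

def pvBumpRow (s : PvStat) (r : List (String × String)) : PvStat :=
  { n := s.n + 1
    lt := pvBump s.lt (pvGet r "listener_type")
    cr := pvBump s.cr (pvGet r "change_rating")
    st := pvBump s.st (pvGet r "settle_time")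
    ac := pvBump s.ac (pvGet r "activity")
    mo := pvBump s.mo (pvGet r "music_opinion")
    ro := pvBump s.ro (pvGet r "rhythm_opinion") }

def pvStepB (d : PySem.Dict String PvStat) (r : List (String × String)) : PySem.Dict String PvStat :=
  match pvGet r "protocol_code" with
  | some code => d.modify code pvStat0 (fun s => pvBumpRow s r)
  | none => d

-- the '{}:{}' and '{}({})' format strings of _fmt, as functions
def pvPairColon (k : String) (c : Int) : String := k ++ ":" ++ PySem.Int.toStr c
def pvPairParen (k : String) (c : Int) : String := k ++ "(" ++ PySem.Int.toStr c ++ ")"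

-- _fmt(counter, top_n, pair, sep)
def pvFmt (c : PySem.Dict String Int) (top_n : Option Nat) (pair : String → Int → String) (sep : String) : String :=
  let items := PySem.List.sorted c.items (fun kv => kv.2) true
  let items := match top_n with | some n => items.take n | none => items
  let s := PySem.Str.join sep (items.map (fun kv => pair kv.1 kv.2))
  if s = "" then "n/a" else s

def pvLineB (code : String) (st : PvStat) : String :=
  code ++ " | n=" ++ PySem.Int.toStr st.n ++ " | " ++
  "listener_type: " ++ pvFmt st.lt none pvPairColon " | " ++ " | " ++
  "change_rating: " ++ pvFmt st.cr (some 3) pvPairParen " / " ++ " | " ++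
  "settle_time: " ++ pvFmt st.st (some 2) pvPairParen " / " ++ " | " ++
  "activity: " ++ pvFmt st.ac (some 2) pvPairParen " / " ++ " | " ++
  "music_opinion: " ++ pvFmt st.mo (some 2) pvPairParen " / " ++ " | " ++
  "rhythm_opinion: " ++ pvFmt st.ro (some 2) pvPairParen " / "

def build_full_survey_context_alt (full_rows : List (List (String × String))) (protocols_out : List (String × String)) : String :=
  let stats := full_rows.foldl pvStepB PySem.Dict.empty
  let lines := (PySem.List.sorted (PySem.Dict.ofList protocols_out).keys (fun s => s) false).foldl
    (fun lines code =>
      match stats.get? code with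
      | none => lines
      | some st => lines ++ [pvLineB code st]) ([] : List String)
  if lines = [] then "No 1-minute survey responses available yet." else PySem.Str.join "\n" lines

-- ===== PRECONDITION & SPEC =====
-- Pre_ excludes exactly the rows on which A raises KeyError: every row must carry the "protocol_code" key.
def Pre_build_full_survey_context (full_rows : List (List (String × String))) (protocols_out : List (String × String)) : Prop :=
  ∀ r ∈ full_rows, (pvGet r "protocol_code").isSome = true
instance (full_rows : List (List (String × String))) (protocols_out : List (String × String)) : Decidable (Pre_build_full_survey_context full_rows protocols_out) := by unfold Pre_build_full_survey_context; infer_instance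

def pvWitness_build_full_survey_context : (List (List (String × String))) × (List (String × String)) :=
  ([[("protocol_code", "a"), ("listener_type", "L")], [("protocol_code", "a"), ("change_rating", "5")]], [("a", "x"), ("b", "y")])

def Spec_build_full_survey_context (full_rows : List (List (String × String))) (protocols_out : List (String × String)) (out : String) : Prop := out = build_full_survey_context_alt full_rows protocols_out
instance (full_rows : List (List (String × String))) (protocols_out : List (String × String)) (out : String) : Decidable (Spec_build_full_survey_context full_rows protocols_out out) := by unfold Spec_build_full_survey_context; infer_instance

-- ===== CLAIM (what is proved, stated in full; the proofs are below) =====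
def Claim_equal_build_full_survey_context : Prop := ∀ (full_rows : List (List (String × String))) (protocols_out : List (String × String)), Dom_build_full_survey_context full_rows protocols_out → Pre_build_full_survey_context full_rows protocols_out → Spec_build_full_survey_context full_rows protocols_out (build_full_survey_context full_rows protocols_out)

-- ===== LEMMAS AND PROOFS =====

def pvPC (c : String) (r : List (String × String)) : Bool := pvGet r "protocol_code" == some c

theorem pvA_getD (l : List (List (String × String))) (c : String)
    (d : PySem.Dict String (List (List (String × String)))) :
    (l.foldl pvStepA d).getD c [] = d.getD c [] ++ l.filter (pvPC c) := by
  induction l generalizing d with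
  | nil => simp
  | cons r t ih =>
    cases hg : pvGet r "protocol_code" with
    | none =>
      simp only [List.foldl_cons, pvStepA, hg, List.filter_cons, pvPC]
      simp [ih]
    | some c0 =>
      by_cases hc : c0 = c
      · subst hc
        simp only [List.foldl_cons, pvStepA, hg, List.filter_cons, pvPC]
        simp [ih, PySem.Dict.getD_modify]
      · simp only [List.foldl_cons, pvStepA, hg, List.filter_cons, pvPC]
        simp [hc, ih, PySem.Dict.getD_modify, Ne.symm hc]

theorem pvB_getD (l : List (List (String × String))) (c : String)
    (d : PySem.Dict String PvStat) :
    (l.foldl pvStepB d).getD c pvStat0 = (l.filter (pvPC c)).foldl pvBumpRow (d.getD c pvStat0) := by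
  induction l generalizing d with
  | nil => simp
  | cons r t ih =>
    cases hg : pvGet r "protocol_code" with
    | none =>
      simp only [List.foldl_cons, pvStepB, hg, List.filter_cons, pvPC]
      simp [ih]
    | some c0 =>
      by_cases hc : c0 = c
      · subst hc
        simp only [List.foldl_cons, pvStepB, hg, List.filter_cons, pvPC]
        simp [ih, PySem.Dict.getD_modify]
      · simp only [List.foldl_cons, pvStepB, hg, List.filter_cons, pvPC]
        simp [hc, ih, PySem.Dict.getD_modify, Ne.symm hc]

theorem pvB_contains (l : List (List (String × String))) (c : String)
    (d : PySem.Dict String PvStat) :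
    (l.foldl pvStepB d).contains c = (d.contains c || l.any (pvPC c)) := by
  induction l generalizing d with
  | nil => simp
  | cons r t ih =>
    cases hg : pvGet r "protocol_code" with
    | none =>
      simp only [List.foldl_cons, pvStepB, hg, List.any_cons, pvPC]
      simp [ih]
    | some c0 =>
      by_cases hc : c0 = c
      · subst hc
        simp only [List.foldl_cons, pvStepB, hg, List.any_cons, pvPC]
        simp [ih, PySem.Dict.contains_modify]
      · have h1 : (c == c0) = false := beq_eq_false_iff_ne.mpr (Ne.symm hc)
        have h2 : (c0 == c) = false := beq_eq_false_iff_ne.mpr hc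
        simp only [List.foldl_cons, pvStepB, hg, List.any_cons, pvPC]
        simp [ih, PySem.Dict.contains_modify, h1, h2]

-- the accumulated record, componentwise
theorem pvFoldRow_eq (l : List (List (String × String))) (s : PvStat) :
    l.foldl pvBumpRow s =
      { n := s.n + l.length
        lt := l.foldl (fun c r => pvBump c (pvGet r "listener_type")) s.lt
        cr := l.foldl (fun c r => pvBump c (pvGet r "change_rating")) s.cr
        st := l.foldl (fun c r => pvBump c (pvGet r "settle_time")) s.st
        ac := l.foldl (fun c r => pvBump c (pvGet r "activity")) s.ac
        mo := l.foldl (fun c r => pvBump c (pvGet r "music_opinion")) s.mo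
        ro := l.foldl (fun c r => pvBump c (pvGet r "rhythm_opinion")) s.ro } := by
  induction l generalizing s with
  | nil => simp
  | cons r t ih =>
    simp only [List.foldl_cons, ih, pvBumpRow]
    simp only [PvStat.mk.injEq, List.length_cons]
    refine ⟨by push_cast; ring, ?_, ?_, ?_, ?_, ?_, ?_⟩ <;> trivial

-- a per-field accumulation is the Counter of A's vals list
theorem pvFoldBump_eq_counter (l : List (List (String × String))) (field : String) :
    l.foldl (fun c r => pvBump c (pvGet r field)) PySem.Dict.empty = PySem.Dict.counter (pvVals l field) := by
  calc l.foldl (fun c r => pvBump c (pvGet r field)) PySem.Dict.empty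
      = (l.map (fun r => pvGet r field)).foldl pvBump PySem.Dict.empty := (List.foldl_map).symm
    _ = ((l.map (fun r => pvGet r field)).filter pvTruthy).foldl
          (fun (c : PySem.Dict String Int) (v : Option String) => c.insert (v.getD "") (c.getD (v.getD "") 0 + 1))
          PySem.Dict.empty :=
        PySem.List.foldl_if_eq_foldl_filter pvTruthy _ _ _
    _ = (pvVals l field).foldl (fun c x => c.insert x (c.getD x 0 + 1)) PySem.Dict.empty := by
        rw [pvVals, List.foldl_map]
    _ = PySem.Dict.counter (pvVals l field) := PySem.Dict.foldl_insert_getD_add_one_eq_counter _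

-- '(' survives into an intercalation whose first piece contains it
theorem pvParen_mem_intercalate (sep : List Char) (x : List Char) (xs : List (List Char)) (h : '(' ∈ x) :
    '(' ∈ List.intercalate sep (x :: xs) := by
  cases xs <;> simp [List.intercalate, List.intersperse]
  · exact h
  · exact Or.inl h

-- a joined nonempty list of "k(c)" pieces is never the empty string
theorem pvJoinParen_ne_empty (sep : String) (l : List (String × Int)) (h : l ≠ []) :
    PySem.Str.join sep (l.map (fun kv => kv.1 ++ "(" ++ PySem.Int.toStr kv.2 ++ ")")) ≠ "" := by
  cases l with
  | nil => exact absurd rfl h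
  | cons kv t =>
    intro hcontra
    have hmem : '(' ∈ (PySem.Str.join sep ((kv :: t).map (fun kv => kv.1 ++ "(" ++ PySem.Int.toStr kv.2 ++ ")"))).toList := by
      simp only [PySem.Str.join, PySem.Chars.join, List.map_cons, String.toList_ofList]
      exact pvParen_mem_intercalate _ _ _ (by simp)
    rw [hcontra] at hmem
    simp at hmem

-- A's per-field summary equals B's _fmt over the prebuilt counter
theorem pvTop_eq_fmt (rows : List (List (String × String))) (field : String) (n : Nat) (hn : 0 < n) :
    pvTopA rows field n = pvFmt (PySem.Dict.counter (pvVals rows field)) (some n) pvPairParen " / " := by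
  by_cases h : pvVals rows field = []
  · rw [pvTopA, pvFmt, h]
    have h0 : PySem.List.sorted (PySem.Dict.counter ([] : List String)).items (fun kv => kv.2) true = [] := rfl
    rw [h0]
    simp only [List.take_nil, List.map_nil]
    rfl
  · rw [pvTopA, pvFmt, if_neg h]
    have hitems : (PySem.Dict.counter (pvVals rows field)).items ≠ [] := by
      rw [PySem.Dict.items_counter]
      simp only [ne_eq, List.map_eq_nil_iff]
      intro hs
      rcases List.exists_mem_of_ne_nil _ h with ⟨v, hv⟩
      have := (PySem.Set.mem_ofList (pvVals rows field) v).2 hv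
      rw [hs] at this
      simp at this
    have hsorted : PySem.List.sorted (PySem.Dict.counter (pvVals rows field)).items (fun kv => kv.2) true ≠ [] := by
      intro hcontra
      exact hitems ((PySem.List.sorted_eq_nil_iff _ _ _).1 hcontra)
    have htake : (PySem.List.sorted (PySem.Dict.counter (pvVals rows field)).items (fun kv => kv.2) true).take n ≠ [] := by
      intro hcontra
      rcases List.take_eq_nil_iff.mp hcontra with h0 | h0
      · omega
      · exact hsorted h0
    have hjoin := pvJoinParen_ne_empty " / " _ htake
    simp only [pvPairParen]
    rw [if_neg hjoin]

-- A's whole line equals B's, for the (nonempty) row list of a protocol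
theorem pvLine_eq (code : String) (rows : List (List (String × String))) :
    pvLineA code rows = pvLineB code (rows.foldl pvBumpRow pvStat0) := by
  rw [pvLineA, pvLineB, pvFoldRow_eq]
  simp only [pvStat0]
  rw [pvFoldBump_eq_counter, pvFoldBump_eq_counter, pvFoldBump_eq_counter,
      pvFoldBump_eq_counter, pvFoldBump_eq_counter, pvFoldBump_eq_counter]
  rw [← pvTop_eq_fmt _ _ 3 (by omega), ← pvTop_eq_fmt _ _ 2 (by omega), ← pvTop_eq_fmt _ _ 2 (by omega),
      ← pvTop_eq_fmt _ _ 2 (by omega), ← pvTop_eq_fmt _ _ 2 (by omega)]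
  have hn : (0 : Int) + rows.length = (rows.length : Int) := by ring
  rw [hn]
  have hl : pvListenerA rows = pvFmt (PySem.Dict.counter (pvVals rows "listener_type")) none pvPairColon " | " := by
    rw [pvListenerA, pvFmt]
    rfl
  rw [hl]

-- ===== VERDICT (by name: the statement is the Claim_ definition above) =====
theorem build_full_survey_context_spec : Claim_equal_build_full_survey_context := by
  intro full_rows protocols_out _hdom hpre
  unfold Spec_build_full_survey_context build_full_survey_context build_full_survey_context_alt
  have hlines : ∀ (codes : List String) (acc : List String),
      codes.foldl (fun lines code =>
        let rows := (full_rows.foldl pvStepA PySem.Dict.empty).getD code []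
        if rows = [] then lines else lines ++ [pvLineA code rows]) acc
      = codes.foldl (fun lines code =>
        match (full_rows.foldl pvStepB PySem.Dict.empty).get? code with
        | none => lines
        | some st => lines ++ [pvLineB code st]) acc := by
    intro codes
    induction codes with
    | nil => intro acc; rfl
    | cons c t ih =>
      intro acc
      simp only [List.foldl_cons]
      rw [← ih]
      congr 1
      by_cases h : full_rows.any (pvPC c) = true
      · -- some rows for this code
        have hget : (full_rows.foldl pvStepA PySem.Dict.empty).getD c [] = full_rows.filter (pvPC c) := by
          rw [pvA_getD]; simp
        have hne : full_rows.filter (pvPC c) ≠ [] := by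
          intro hcontra
          rcases List.any_eq_true.mp h with ⟨r, hr, hp⟩
          exact absurd hp (by simpa using (List.filter_eq_nil_iff.mp hcontra) r hr)
        have hcontB : (full_rows.foldl pvStepB PySem.Dict.empty).contains c = true := by
          rw [pvB_contains]; simp [h]
        have hsomeB : ∃ st, (full_rows.foldl pvStepB PySem.Dict.empty).get? c = some st := by
          cases hg : (full_rows.foldl pvStepB PySem.Dict.empty).get? c with
          | none => rw [PySem.Dict.get?_eq_none_iff_contains] at hg; rw [hg] at hcontB; cases hcontB
          | some st => exact ⟨st, rfl⟩
        rcases hsomeB with ⟨st, hst⟩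
        have hstval : st = (full_rows.filter (pvPC c)).foldl pvBumpRow pvStat0 := by
          have := pvB_getD full_rows c PySem.Dict.empty
          rw [PySem.Dict.getD_eq_get?_getD, hst, PySem.Dict.getD_empty] at this
          simpa using this
        rw [hget, hst, if_neg hne, hstval, pvLine_eq]
      · -- no rows for this code
        have hany : full_rows.any (pvPC c) = false := by simpa using h
        have hget : (full_rows.foldl pvStepA PySem.Dict.empty).getD c [] = [] := by
          rw [pvA_getD, PySem.Dict.getD_empty]
          simp [List.filter_eq_nil_iff]
          intro r hr
          have := List.any_eq_false.mp hany r hr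
          simpa using this
        have hcontB : (full_rows.foldl pvStepB PySem.Dict.empty).contains c = false := by
          rw [pvB_contains]; simp [hany]
        have hnoneB : (full_rows.foldl pvStepB PySem.Dict.empty).get? c = none :=
          (PySem.Dict.get?_eq_none_iff_contains _ _).2 hcontB
        rw [hget, hnoneB, if_pos rfl]
  simp only [hlines]
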